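-- pv_equiv track=rewrite | github.com/TristanBoucansaud/melodies-generator | Final Harmonique.py | lire
-- ===== SOURCE A (Python) =====
-- def lire(L): # récupère les informations utiles: les notes et leur temps d'apparition
--     espace=0
--     x=0
--     OnOff=''
--     Note=''
--     while espace!=5:
--         if L[x]==' ':
--             espace+=1
--         if espace==3:
--            OnOff+=L[x]
--         if espace==4:
--             Note+=L[x]
--         x+=1
--     return(Note[1:],OnOff[1:])
-- ===== SOURCE B (Python) =====
-- def lire(L): # récupère les informations utiles: les notes et leur temps d'apparition
--     P = [i for i, c in enumerate(L) if c == ' ']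
--     return (L[P[3]+1:P[4]], L[P[2]+1:P[3]])
-- ===== Notes on version B (the rewrite author's own statement) =====
-- stated objective: simpler
-- what changed: A's stateful while loop that counts spaces and accumulates characters into two growing strings is replaced by computing the list of space positions once and returning two direct slices between consecutive space positions.
import Mathlib
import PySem

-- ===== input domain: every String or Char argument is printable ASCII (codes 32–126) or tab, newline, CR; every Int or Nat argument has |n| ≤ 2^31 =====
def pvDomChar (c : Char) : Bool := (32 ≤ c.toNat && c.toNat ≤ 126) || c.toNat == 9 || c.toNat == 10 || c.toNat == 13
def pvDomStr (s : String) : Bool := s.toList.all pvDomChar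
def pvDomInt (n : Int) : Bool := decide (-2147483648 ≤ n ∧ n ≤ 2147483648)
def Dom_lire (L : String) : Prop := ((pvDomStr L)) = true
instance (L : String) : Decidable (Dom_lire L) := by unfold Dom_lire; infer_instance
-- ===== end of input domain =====

-- B replaces A's space-counting accumulator loop by space positions + two slices (objective: simpler).

-- ===== PORT A =====
-- A's while loop: espace counts spaces seen; chars while espace==3 go to OnOff, while espace==4 to Note;
-- the loop stops when espace reaches 5. The [] case is Python's IndexError (excluded by Pre_lire).
def lireA : List Char → Nat → List Char → List Char → String × String
  | [], _, onOff, note => (String.ofList (note.drop 1), String.ofList (onOff.drop 1))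
  | c :: rest, espace, onOff, note =>
      let espace := if c = ' ' then espace + 1 else espace
      let onOff := if espace = 3 then onOff ++ [c] else onOff
      let note := if espace = 4 then note ++ [c] else note
      if espace = 5 then (String.ofList (note.drop 1), String.ofList (onOff.drop 1))
      else lireA rest espace onOff note

def lire (L : String) : String × String := lireA L.toList 0 [] []

-- ===== PORT B =====
-- P = [i for i, c in enumerate(L) if c == ' ']; return (L[P[3]+1:P[4]], L[P[2]+1:P[3]]).
-- The catch-all match arm is Python's IndexError when P has fewer than 5 entries (excluded by Pre_lire).
def lire_alt (L : String) : String × String :=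
  let P : List Int := ((PySem.List.enumerate L.toList 0).filter (fun p => p.2 == ' ')).map (·.1)
  match PySem.List.pyGet? P 2, PySem.List.pyGet? P 3, PySem.List.pyGet? P 4 with
  | some p2, some p3, some p4 =>
      (String.ofList (PySem.List.slice L.toList (some (p3 + 1)) (some p4)),
       String.ofList (PySem.List.slice L.toList (some (p2 + 1)) (some p3)))
  | _, _, _ => ("", "")

-- ===== PRECONDITION & SPEC =====
-- Pre_ excludes exactly the inputs with fewer than five spaces, on which both A and B raise IndexError.
def Pre_lire (L : String) : Prop := 5 ≤ L.toList.count ' '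
instance (L : String) : Decidable (Pre_lire L) := by unfold Pre_lire; infer_instance
def pvWitness_lire : String := "n 1 2 3 on60 t90 x"

def Spec_lire (L : String) (out : String × String) : Prop := out = lire_alt L
instance (L : String) (out : String × String) : Decidable (Spec_lire L out) := by unfold Spec_lire; infer_instance

-- ===== CLAIM (what is proved, stated in full; the proofs are below) =====
def Claim_equal_lire : Prop := ∀ (L : String), Dom_lire L → Pre_lire L → Spec_lire L (lire L)

-- ===== LEMMAS AND PROOFS =====

-- "not a space" as a Bool predicate, its takeWhile prefix, and the suffix after the first space
def nsp (c : Char) : Bool := c ≠ ' '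
def tw (cs : List Char) : List Char := cs.takeWhile nsp
def afterSpace (cs : List Char) : List Char := (cs.dropWhile nsp).tail

lemma tw_cons_space (rest : List Char) : tw (' ' :: rest) = [] := by simp [tw, nsp]
lemma tw_cons_of_ne {c : Char} (h : c ≠ ' ') (rest : List Char) :
    tw (c :: rest) = c :: tw rest := by simp [tw, nsp, h]
lemma afterSpace_cons_space (rest : List Char) : afterSpace (' ' :: rest) = rest := by
  simp [afterSpace, nsp]
lemma afterSpace_cons_of_ne {c : Char} (h : c ≠ ' ') (rest : List Char) :
    afterSpace (c :: rest) = afterSpace rest := by simp [afterSpace, nsp, h]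

lemma count_afterSpace (cs : List Char) (h : ' ' ∈ cs) :
    (afterSpace cs).count ' ' = cs.count ' ' - 1 := by
  induction cs with
  | nil => cases h
  | cons c rest ih =>
    by_cases hc : c = ' '
    · subst hc; simp [afterSpace_cons_space]
    · have hm : ' ' ∈ rest := by cases h with
        | head => exact absurd rfl hc
        | tail _ h' => exact h'
      have hpos : 0 < rest.count ' ' := List.count_pos_iff.mpr hm
      rw [afterSpace_cons_of_ne hc, ih hm]
      simp [hc]

lemma drop_tw (cs : List Char) (h : ' ' ∈ cs) :
    cs.drop ((tw cs).length + 1) = afterSpace cs := by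
  induction cs with
  | nil => cases h
  | cons c rest ih =>
    by_cases hc : c = ' '
    · subst hc; simp [tw_cons_space, afterSpace_cons_space]
    · have hm : ' ' ∈ rest := by cases h with
        | head => exact absurd rfl hc
        | tail _ h' => exact h'
      rw [tw_cons_of_ne hc, afterSpace_cons_of_ne hc]
      simpa using ih hm

lemma tw_eq_take (cs : List Char) : tw cs = cs.take (tw cs).length :=
  (List.prefix_iff_eq_take).mp (List.takeWhile_prefix nsp)

-- ===== characterisation of A's loop, phase by phase =====

lemma lireA_four (cs : List Char) (onOff note : List Char) (h : ' ' ∈ cs) :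
    lireA cs 4 onOff note =
      (String.ofList ((note ++ tw cs).drop 1), String.ofList (onOff.drop 1)) := by
  induction cs generalizing note with
  | nil => cases h
  | cons c rest ih =>
    by_cases hc : c = ' '
    · subst hc; simp [lireA, tw_cons_space]
    · have hm : ' ' ∈ rest := by cases h with
        | head => exact absurd rfl hc
        | tail _ h' => exact h'
      rw [tw_cons_of_ne hc]
      simp only [lireA, if_neg hc]
      norm_num
      rw [ih (note ++ [c]) hm]
      simp

lemma lireA_three (cs : List Char) (onOff note : List Char) (h : 2 ≤ cs.count ' ') :
    lireA cs 3 onOff note =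
      (String.ofList ((note ++ ' ' :: tw (afterSpace cs)).drop 1),
       String.ofList ((onOff ++ tw cs).drop 1)) := by
  induction cs generalizing onOff with
  | nil => simp at h
  | cons c rest ih =>
    by_cases hc : c = ' '
    · subst hc
      have hm : ' ' ∈ rest := by
        have hcnt : (' ' :: rest).count ' ' = rest.count ' ' + 1 := List.count_cons_self ..
        exact List.count_pos_iff.mp (by omega)
      simp only [lireA]
      norm_num
      rw [lireA_four rest onOff (note ++ [' ']) hm, tw_cons_space, afterSpace_cons_space]
      simp
    · have hr : 2 ≤ rest.count ' ' := by
        rwa [List.count_cons_of_ne hc] at h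
      rw [tw_cons_of_ne hc, afterSpace_cons_of_ne hc]
      simp only [lireA, if_neg hc]
      norm_num
      rw [ih (onOff ++ [c]) hr]
      simp

lemma lireA_skip (cs : List Char) (onOff note : List Char) (e : Nat)
    (he : e ≤ 2) (h : ' ' ∈ cs) :
    lireA cs e onOff note =
      lireA (afterSpace cs) (e + 1) (if e = 2 then onOff ++ [' '] else onOff) note := by
  interval_cases e <;>
  · induction cs generalizing onOff with
    | nil => cases h
    | cons c rest ih =>
      by_cases hc : c = ' '
      · subst hc
        rw [afterSpace_cons_space]
        simp [lireA]
      · have hm : ' ' ∈ rest := by cases h with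
          | head => exact absurd rfl hc
          | tail _ h' => exact h'
        rw [afterSpace_cons_of_ne hc]
        simp only [lireA, if_neg hc]
        norm_num
        simpa using ih onOff hm

-- ===== characterisation of B's position list =====

def PB (cs : List Char) (s : Int) : List Int :=
  ((PySem.List.enumerate cs s).filter (fun p => p.2 == ' ')).map (·.1)

lemma PB_eq (cs : List Char) (h : ' ' ∈ cs) (s : Int) :
    PB cs s = (s + (tw cs).length) ::
      PB (afterSpace cs) (s + (tw cs).length + 1) := by
  induction cs generalizing s with
  | nil => cases h
  | cons c rest ih =>
    by_cases hc : c = ' '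
    · subst hc
      rw [tw_cons_space, afterSpace_cons_space]
      simp [PB, PySem.List.enumerate_cons]
    · have hm : ' ' ∈ rest := by cases h with
        | head => exact absurd rfl hc
        | tail _ h' => exact h'
      rw [tw_cons_of_ne hc, afterSpace_cons_of_ne hc]
      have : PB (c :: rest) s = PB rest (s + 1) := by
        simp [PB, PySem.List.enumerate_cons, hc]
      rw [this, ih hm]
      simp only [List.length_cons]
      congr 1
      · push_cast; ring
      · congr 2
        push_cast; ring

-- literal positive index into a list with at least five known elements
lemma pyGet5_two (x0 x1 x2 x3 x4 : Int) (t : List Int) :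
    PySem.List.pyGet? (x0 :: x1 :: x2 :: x3 :: x4 :: t) 2 = some x2 := by
  rw [show (2 : Int) = ((2 : Nat) : Int) by norm_num, PySem.List.pyGet?_natCast]
  simp

lemma pyGet5_three (x0 x1 x2 x3 x4 : Int) (t : List Int) :
    PySem.List.pyGet? (x0 :: x1 :: x2 :: x3 :: x4 :: t) 3 = some x3 := by
  rw [show (3 : Int) = ((3 : Nat) : Int) by norm_num, PySem.List.pyGet?_natCast]
  simp

lemma pyGet5_four (x0 x1 x2 x3 x4 : Int) (t : List Int) :
    PySem.List.pyGet? (x0 :: x1 :: x2 :: x3 :: x4 :: t) 4 = some x4 := by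
  rw [show (4 : Int) = ((4 : Nat) : Int) by norm_num, PySem.List.pyGet?_natCast]
  simp

-- A's loop on a string with at least five spaces returns the fifth and fourth gap
lemma lireA_char (cs : List Char) (h0 : 5 ≤ cs.count ' ') :
    lireA cs 0 [] [] =
      (String.ofList (tw (afterSpace (afterSpace (afterSpace (afterSpace cs))))),
       String.ofList (tw (afterSpace (afterSpace (afterSpace cs))))) := by
  have m0 : ' ' ∈ cs := List.count_pos_iff.mp (by omega)
  have k1 := count_afterSpace cs m0
  have m1 : ' ' ∈ afterSpace cs := List.count_pos_iff.mp (by omega)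
  have k2 := count_afterSpace _ m1
  have m2 : ' ' ∈ afterSpace (afterSpace cs) := List.count_pos_iff.mp (by omega)
  have k3 := count_afterSpace _ m2
  have hc3 : 2 ≤ (afterSpace (afterSpace (afterSpace cs))).count ' ' := by omega
  rw [lireA_skip cs [] [] 0 (by omega) m0]
  norm_num
  rw [lireA_skip _ [] [] 1 (by omega) m1]
  norm_num
  rw [lireA_skip _ [] [] 2 (by omega) m2]
  norm_num
  rw [lireA_three _ [' '] [] hc3]
  simp

-- B on a string with at least five spaces returns the same two gaps
lemma lire_alt_char (L : String) (h0 : 5 ≤ L.toList.count ' ') :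
    lire_alt L =
      (String.ofList (tw (afterSpace (afterSpace (afterSpace (afterSpace L.toList))))),
       String.ofList (tw (afterSpace (afterSpace (afterSpace L.toList))))) := by
  have m0 : ' ' ∈ L.toList := List.count_pos_iff.mp (by omega)
  have k1 := count_afterSpace L.toList m0
  have m1 : ' ' ∈ afterSpace L.toList := List.count_pos_iff.mp (by omega)
  have k2 := count_afterSpace _ m1
  have m2 : ' ' ∈ afterSpace (afterSpace L.toList) := List.count_pos_iff.mp (by omega)
  have k3 := count_afterSpace _ m2
  have m3 : ' ' ∈ afterSpace (afterSpace (afterSpace L.toList)) := List.count_pos_iff.mp (by omega)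
  have k4 := count_afterSpace _ m3
  have m4 : ' ' ∈ afterSpace (afterSpace (afterSpace (afterSpace L.toList))) :=
    List.count_pos_iff.mp (by omega)
  -- names for the five gap lengths
  have hP : PB L.toList 0 =
      (((tw L.toList).length : Nat) : Int) ::
      (((tw L.toList).length + (tw (afterSpace L.toList)).length + 1 : Nat) : Int) ::
      (((tw L.toList).length + (tw (afterSpace L.toList)).length +
          (tw (afterSpace (afterSpace L.toList))).length + 2 : Nat) : Int) ::
      (((tw L.toList).length + (tw (afterSpace L.toList)).length +
          (tw (afterSpace (afterSpace L.toList))).length +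
          (tw (afterSpace (afterSpace (afterSpace L.toList)))).length + 3 : Nat) : Int) ::
      (((tw L.toList).length + (tw (afterSpace L.toList)).length +
          (tw (afterSpace (afterSpace L.toList))).length +
          (tw (afterSpace (afterSpace (afterSpace L.toList)))).length +
          (tw (afterSpace (afterSpace (afterSpace (afterSpace L.toList))))).length + 4 : Nat) : Int) ::
      PB (afterSpace (afterSpace (afterSpace (afterSpace (afterSpace L.toList)))))
        (((tw L.toList).length + (tw (afterSpace L.toList)).length +
          (tw (afterSpace (afterSpace L.toList))).length +
          (tw (afterSpace (afterSpace (afterSpace L.toList)))).length +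
          (tw (afterSpace (afterSpace (afterSpace (afterSpace L.toList))))).length + 5 : Nat) : Int) := by
    rw [PB_eq _ m0, PB_eq _ m1, PB_eq _ m2, PB_eq _ m3, PB_eq _ m4]
    simp only [List.cons.injEq]
    refine ⟨by ring, by push_cast; ring, by push_cast; ring,
      by push_cast; ring, by push_cast; ring, ?_⟩
    congr 1
    push_cast
    ring
  -- the two slices are the gaps
  have D2 : L.toList.drop ((tw L.toList).length + (tw (afterSpace L.toList)).length + 2) =
      afterSpace (afterSpace L.toList) := by
    rw [show (tw L.toList).length + (tw (afterSpace L.toList)).length + 2 =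
        ((tw L.toList).length + 1) + ((tw (afterSpace L.toList)).length + 1) from by omega,
      ← List.drop_drop, drop_tw _ m0, drop_tw _ m1]
  have d3 : L.toList.drop ((tw L.toList).length + (tw (afterSpace L.toList)).length +
      (tw (afterSpace (afterSpace L.toList))).length + 3) =
      afterSpace (afterSpace (afterSpace L.toList)) := by
    rw [show (tw L.toList).length + (tw (afterSpace L.toList)).length +
        (tw (afterSpace (afterSpace L.toList))).length + 3 =
        ((tw L.toList).length + (tw (afterSpace L.toList)).length + 2) +
        ((tw (afterSpace (afterSpace L.toList))).length + 1) from by omega,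
      ← List.drop_drop, D2, drop_tw _ m2]
  have d4 : L.toList.drop ((tw L.toList).length + (tw (afterSpace L.toList)).length +
      (tw (afterSpace (afterSpace L.toList))).length +
      (tw (afterSpace (afterSpace (afterSpace L.toList)))).length + 4) =
      afterSpace (afterSpace (afterSpace (afterSpace L.toList))) := by
    rw [show (tw L.toList).length + (tw (afterSpace L.toList)).length +
        (tw (afterSpace (afterSpace L.toList))).length +
        (tw (afterSpace (afterSpace (afterSpace L.toList)))).length + 4 =
        ((tw L.toList).length + (tw (afterSpace L.toList)).length +
          (tw (afterSpace (afterSpace L.toList))).length + 3) +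
        ((tw (afterSpace (afterSpace (afterSpace L.toList)))).length + 1) from by omega,
      ← List.drop_drop, d3, drop_tw _ m3]
  unfold lire_alt
  have ePB : ((PySem.List.enumerate L.toList 0).filter (fun p => p.2 == ' ')).map (·.1) =
      PB L.toList 0 := rfl
  rw [ePB, hP]
  dsimp only
  rw [pyGet5_two, pyGet5_three, pyGet5_four]
  have s2 : PySem.List.slice L.toList
      (some ((((tw L.toList).length + (tw (afterSpace L.toList)).length +
        (tw (afterSpace (afterSpace L.toList))).length + 2 : Nat) : Int) + 1))
      (some (((tw L.toList).length + (tw (afterSpace L.toList)).length +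
        (tw (afterSpace (afterSpace L.toList))).length +
        (tw (afterSpace (afterSpace (afterSpace L.toList)))).length + 3 : Nat) : Int)) =
      tw (afterSpace (afterSpace (afterSpace L.toList))) := by
    rw [show ((((tw L.toList).length + (tw (afterSpace L.toList)).length +
        (tw (afterSpace (afterSpace L.toList))).length + 2 : Nat) : Int) + 1) =
        (((tw L.toList).length + (tw (afterSpace L.toList)).length +
        (tw (afterSpace (afterSpace L.toList))).length + 3 : Nat) : Int) from by push_cast; ring,
      PySem.List.slice_natCast, d3,
      show (tw L.toList).length + (tw (afterSpace L.toList)).length +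
        (tw (afterSpace (afterSpace L.toList))).length +
        (tw (afterSpace (afterSpace (afterSpace L.toList)))).length + 3 -
        ((tw L.toList).length + (tw (afterSpace L.toList)).length +
        (tw (afterSpace (afterSpace L.toList))).length + 3) =
        (tw (afterSpace (afterSpace (afterSpace L.toList)))).length from by omega]
    exact (tw_eq_take _).symm
  have s1 : PySem.List.slice L.toList
      (some ((((tw L.toList).length + (tw (afterSpace L.toList)).length +
        (tw (afterSpace (afterSpace L.toList))).length +
        (tw (afterSpace (afterSpace (afterSpace L.toList)))).length + 3 : Nat) : Int) + 1))
      (some (((tw L.toList).length + (tw (afterSpace L.toList)).length +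
        (tw (afterSpace (afterSpace L.toList))).length +
        (tw (afterSpace (afterSpace (afterSpace L.toList)))).length +
        (tw (afterSpace (afterSpace (afterSpace (afterSpace L.toList))))).length + 4 : Nat) : Int)) =
      tw (afterSpace (afterSpace (afterSpace (afterSpace L.toList)))) := by
    rw [show ((((tw L.toList).length + (tw (afterSpace L.toList)).length +
        (tw (afterSpace (afterSpace L.toList))).length +
        (tw (afterSpace (afterSpace (afterSpace L.toList)))).length + 3 : Nat) : Int) + 1) =
        (((tw L.toList).length + (tw (afterSpace L.toList)).length +
        (tw (afterSpace (afterSpace L.toList))).length +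
        (tw (afterSpace (afterSpace (afterSpace L.toList)))).length + 4 : Nat) : Int) from by
          push_cast; ring,
      PySem.List.slice_natCast, d4,
      show (tw L.toList).length + (tw (afterSpace L.toList)).length +
        (tw (afterSpace (afterSpace L.toList))).length +
        (tw (afterSpace (afterSpace (afterSpace L.toList)))).length +
        (tw (afterSpace (afterSpace (afterSpace (afterSpace L.toList))))).length + 4 -
        ((tw L.toList).length + (tw (afterSpace L.toList)).length +
        (tw (afterSpace (afterSpace L.toList))).length +
        (tw (afterSpace (afterSpace (afterSpace L.toList)))).length + 4) =
        (tw (afterSpace (afterSpace (afterSpace (afterSpace L.toList))))).length from by omega]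
    exact (tw_eq_take _).symm
  simp only [s1, s2]

theorem lire_spec : Claim_equal_lire := by
  intro L _ hpre
  unfold Spec_lire
  have h0 : 5 ≤ L.toList.count ' ' := hpre
  show lire L = lire_alt L
  unfold lire
  rw [lireA_char L.toList h0, lire_alt_char L h0]
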